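-- pv_equiv track=rewrite | github.com/flashinfer-ai/flashinfer | flashinfer/fused_moe/utils.py | round_to_nearest_bucket
-- ===== SOURCE A (Python) =====
-- from typing import Dict, List, Sequence, Tuple
--
-- def round_to_nearest_bucket(
--     x: int, buckets: Sequence[int], round_map: bool = False
-- ) -> int:
--     """Map *x* to the nearest bucket using floor or ceil semantics.
--
--     Args:
--         x: The value to map.
--         buckets: Bucket values in **ascending** order.  Must not be empty.
--         round_map: Rounding direction.
--
--             * ``False`` (default) -- **floor**: return the largest bucket
--               that is ``<= x``.  If *x* is smaller than every bucket, the
--               smallest bucket is returned (clamped).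
--             * ``True`` -- **ceil**: return the smallest bucket that is
--               ``>= x``.  If *x* is larger than every bucket, the largest
--               bucket is returned (clamped).
--
--     Returns:
--         The matched bucket value.  Always one of the elements in *buckets*.
--
--     Examples::
--
--         >>> round_to_nearest_bucket(350, [100, 200, 500, 1000])
--         200
--         >>> round_to_nearest_bucket(350, [100, 200, 500, 1000], round_map=True)
--         500
--         >>> round_to_nearest_bucket(2000, [100, 200, 500, 1000], round_map=True)
--         1000
--     """
--     if len(buckets) == 0:
--         raise ValueError("buckets must be non-empty")
--     if round_map:
--         for b in buckets:
--             if b >= x: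
--                 return b
--         return buckets[-1]
--     else:
--         for b in reversed(buckets):
--             if b <= x:
--                 return b
--         return buckets[0]
-- ===== SOURCE B (Python) =====
-- from typing import Dict, List, Sequence, Tuple
--
--
-- def round_to_nearest_bucket(
--     x: int, buckets: Sequence[int], round_map: bool = False
-- ) -> int:
--     """Single accumulator pass in the opposite direction: instead of A's
--     early-return first-match scan, keep overwriting the candidate so the
--     final value is the last match of the opposite-direction traversal,
--     which equals A's first match.  Works for any bucket order."""
--     if round_map:
--         res = buckets[-1]
--         for b in reversed(buckets):
--             if b >= x:
--                 res = b
--         return res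
--     else:
--         res = buckets[0]
--         for b in buckets:
--             if b <= x:
--                 res = b
--         return res
-- ===== Notes on version B (the rewrite author's own statement) =====
-- stated objective: alternative
-- what changed: A finds the first matching bucket with an early-return scan (forward for ceil, over reversed(buckets) for floor); B traverses once in the opposite direction with an overwrite accumulator, so the last overwrite equals A's first match and no early exit or second traversal direction is needed.
import Mathlib
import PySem

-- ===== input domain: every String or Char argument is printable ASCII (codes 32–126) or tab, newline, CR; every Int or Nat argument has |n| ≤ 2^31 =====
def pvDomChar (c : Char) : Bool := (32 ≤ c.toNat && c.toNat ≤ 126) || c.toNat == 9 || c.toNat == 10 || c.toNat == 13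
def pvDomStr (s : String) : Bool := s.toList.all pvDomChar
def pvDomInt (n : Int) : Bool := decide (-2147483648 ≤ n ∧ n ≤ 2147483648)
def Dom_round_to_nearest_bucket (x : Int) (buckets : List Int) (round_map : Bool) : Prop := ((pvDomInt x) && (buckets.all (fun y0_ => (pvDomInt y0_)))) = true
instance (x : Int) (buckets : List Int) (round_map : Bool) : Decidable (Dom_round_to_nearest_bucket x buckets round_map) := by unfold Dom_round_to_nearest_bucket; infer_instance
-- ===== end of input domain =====

-- B replaces A's early-return first-match scans by one overwrite-accumulator pass in the opposite
-- direction (its last overwrite is A's first match); equivalent for any bucket order (alternative).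

-- ===== PORT A =====
-- A scans forward (ceil) or over reversed(buckets) (floor) and returns the first hit,
-- clamping to the last / first bucket; on empty buckets A raises ValueError (excluded by Pre_).
def round_to_nearest_bucket (x : Int) (buckets : List Int) (round_map : Bool) : Int :=
  if buckets.length = 0 then 0  -- raise ValueError: outside Pre_
  else if round_map then
    match buckets.find? (fun b => decide (x ≤ b)) with
    | some b => b
    | none => (PySem.List.pyGet? buckets (-1)).getD 0
  else
    match buckets.reverse.find? (fun b => decide (b ≤ x)) with
    | some b => b
    | none => (PySem.List.pyGet? buckets 0).getD 0

-- ===== PORT B =====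
-- B reads the clamp bucket first (buckets[-1] / buckets[0]; IndexError on empty buckets, outside
-- Pre_) and then folds once over the opposite traversal order, overwriting the candidate on a hit.
def round_to_nearest_bucket_alt (x : Int) (buckets : List Int) (round_map : Bool) : Int :=
  if round_map then
    buckets.reverse.foldl (fun res b => if x ≤ b then b else res)
      ((PySem.List.pyGet? buckets (-1)).getD 0)
  else
    buckets.foldl (fun res b => if b ≤ x then b else res)
      ((PySem.List.pyGet? buckets 0).getD 0)

-- ===== PRECONDITION & SPEC =====
-- Pre_ excludes only the empty list, on which A raises ValueError (and B raises IndexError).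
def Pre_round_to_nearest_bucket (x : Int) (buckets : List Int) (round_map : Bool) : Prop :=
  buckets ≠ []
instance (x : Int) (buckets : List Int) (round_map : Bool) : Decidable (Pre_round_to_nearest_bucket x buckets round_map) := by unfold Pre_round_to_nearest_bucket; infer_instance

def pvWitness_round_to_nearest_bucket : Int × List Int × Bool := (350, ([100, 200, 500, 1000], false))

def Spec_round_to_nearest_bucket (x : Int) (buckets : List Int) (round_map : Bool) (out : Int) : Prop := out = round_to_nearest_bucket_alt x buckets round_map
instance (x : Int) (buckets : List Int) (round_map : Bool) (out : Int) : Decidable (Spec_round_to_nearest_bucket x buckets round_map out) := by unfold Spec_round_to_nearest_bucket; infer_instance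

-- ===== CLAIM (what is proved, stated in full; the proofs are below) =====
def Claim_equal_round_to_nearest_bucket : Prop := ∀ (x : Int) (buckets : List Int) (round_map : Bool), Dom_round_to_nearest_bucket x buckets round_map → Pre_round_to_nearest_bucket x buckets round_map → Spec_round_to_nearest_bucket x buckets round_map (round_to_nearest_bucket x buckets round_map)

-- ===== LEMMAS AND PROOFS =====

-- the overwrite fold over the reversed list computes the first match of the forward scan
lemma foldl_reverse_find (p : Int → Prop) [DecidablePred p] (l : List Int) (init : Int) :
    l.reverse.foldl (fun res b => if p b then b else res) init
      = (l.find? (fun b => decide (p b))).getD init := by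
  induction l with
  | nil => simp
  | cons a t ih =>
    rw [List.reverse_cons, List.foldl_append, ih]
    by_cases hp : p a <;> simp [List.find?, hp]

-- ===== VERDICT (by name: the statement is the Claim_ definition above) =====
theorem round_to_nearest_bucket_spec : Claim_equal_round_to_nearest_bucket := by
  intro x buckets round_map _ hpre
  have hlen : ¬ buckets.length = 0 := by
    simpa [List.length_eq_zero_iff] using hpre
  unfold Spec_round_to_nearest_bucket round_to_nearest_bucket round_to_nearest_bucket_alt
  rw [if_neg hlen]
  cases round_map with
  | true =>
    simp only [if_pos]
    rw [foldl_reverse_find (fun b => x ≤ b)]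
    cases h : buckets.find? (fun b => decide (x ≤ b)) <;> simp [h]
  | false =>
    simp only [Bool.false_eq_true, if_neg, not_false_iff]
    have hb : buckets.foldl (fun res b => if b ≤ x then b else res)
        ((PySem.List.pyGet? buckets 0).getD 0)
        = (buckets.reverse.find? (fun b => decide (b ≤ x))).getD
            ((PySem.List.pyGet? buckets 0).getD 0) := by
      have := foldl_reverse_find (fun b => b ≤ x) buckets.reverse
        ((PySem.List.pyGet? buckets 0).getD 0)
      rwa [List.reverse_reverse] at this
    rw [hb]
    cases h : buckets.reverse.find? (fun b => decide (b ≤ x)) <;> simp [h]
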